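-- pv_equiv track=rewrite | github.com/p-koenig/bwinfCodeNew | Aufgabe2_Twist/mainAufgabe2_Twist.py | list_take_apart
-- ===== SOURCE A (Python) =====
-- def list_take_apart(text_raw_list):
--     buffer = []
--     text_output = []
--     for text_part in text_raw_list:
--         for character in text_part:
--             if character.isalpha():
--                     buffer.append(character)
--             elif not character.isalpha():
--                 if not buffer == []:
--                     text_output.append(buffer)
--                     buffer = []
--                 text_output.append([character])
--     if not buffer == []:
--         text_output.append(buffer)
--     return text_output
-- ===== SOURCE B (Python) =====
-- def list_take_apart(text_raw_list):
--     chars = [c for s in text_raw_list for c in s]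
--     out = []
--     i = 0
--     n = len(chars)
--     while i < n:
--         if chars[i].isalpha():
--             j = i + 1
--             while j < n and chars[j].isalpha():
--                 j += 1
--             out.append(chars[i:j])
--             i = j
--         else:
--             out.append([chars[i]])
--             i += 1
--     return out
-- ===== Notes on version B (the rewrite author's own statement) =====
-- stated objective: idiomatic
-- what changed: B flattens all characters into one stream and extracts each maximal alphabetic run at once with a greedy two-pointer scan, instead of A's char-by-char buffer accumulated across nested loops and flushed on each non-letter and at the end.
import Mathlib
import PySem

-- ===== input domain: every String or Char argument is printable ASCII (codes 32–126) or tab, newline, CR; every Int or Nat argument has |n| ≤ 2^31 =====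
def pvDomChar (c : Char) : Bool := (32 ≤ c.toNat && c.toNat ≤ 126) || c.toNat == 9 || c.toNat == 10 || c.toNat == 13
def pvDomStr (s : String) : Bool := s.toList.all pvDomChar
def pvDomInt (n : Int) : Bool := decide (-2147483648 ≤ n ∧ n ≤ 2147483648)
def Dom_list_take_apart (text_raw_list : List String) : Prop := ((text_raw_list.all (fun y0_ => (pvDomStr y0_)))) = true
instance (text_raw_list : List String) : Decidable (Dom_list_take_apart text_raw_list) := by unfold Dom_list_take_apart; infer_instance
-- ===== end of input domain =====

-- B flattens all characters into one stream and emits maximal alphabetic runs by a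
-- greedy two-pointer scan, instead of A's char-by-char buffer carried across the
-- nested loops; same return value, objective: simpler/idiomatic (not faster).

-- ===== PORT A =====
-- the body of A's inner loop: state = (buffer, text_output)
def pvStepA (st : List String × List (List String)) (character : Char) :
    List String × List (List String) :=
  let (buffer, text_output) := st
  if PySem.Chars.isalpha character then
    (buffer ++ [String.ofList [character]], text_output)
  else
    let text_output := if ¬ buffer = [] then text_output ++ [buffer] else text_output
    ([], text_output ++ [[String.ofList [character]]])

def list_take_apart (text_raw_list : List String) : List (List String) :=
  let res := text_raw_list.foldl
    (fun st text_part => text_part.toList.foldl pvStepA st) ([], [])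
  if ¬ res.1 = [] then res.2 ++ [res.1] else res.2

-- ===== PORT B =====
-- Source B's while-loop over the flattened character list: on a letter, take the whole
-- maximal alphabetic run chars[i:j] at once and jump i to j; else emit a singleton.
def pvScanB : List Char → List (List String)
  | [] => []
  | c :: cs =>
    if PySem.Chars.isalpha c then
      ((c :: cs.takeWhile PySem.Chars.isalpha).map (fun ch => String.ofList [ch]))
        :: pvScanB (cs.dropWhile PySem.Chars.isalpha)
    else
      [String.ofList [c]] :: pvScanB cs
termination_by l => l.length
decreasing_by
  · simp only [List.length_cons]
    exact Nat.lt_succ_of_le (List.length_dropWhile_le _ _)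
  · simp

def list_take_apart_alt (text_raw_list : List String) : List (List String) :=
  pvScanB (text_raw_list.flatMap String.toList)

-- ===== PRECONDITION & SPEC =====
def Spec_list_take_apart (text_raw_list : List String) (out : List (List String)) : Prop := out = list_take_apart_alt text_raw_list
instance (text_raw_list : List String) (out : List (List String)) : Decidable (Spec_list_take_apart text_raw_list out) := by unfold Spec_list_take_apart; infer_instance

-- ===== CLAIM (what is proved, stated in full; the proofs are below) =====
def Claim_equal_list_take_apart : Prop := ∀ (text_raw_list : List String), Dom_list_take_apart text_raw_list → Spec_list_take_apart text_raw_list (list_take_apart text_raw_list)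

-- ===== LEMMAS AND PROOFS =====

-- A's double loop is a single fold over the flattened character stream
theorem pv_foldl_flat (xs : List String) (st : List String × List (List String)) :
    xs.foldl (fun st text_part => text_part.toList.foldl pvStepA st) st
      = (xs.flatMap String.toList).foldl pvStepA st := by
  induction xs generalizing st with
  | nil => rfl
  | cons s xs ih => simp [List.flatMap_cons, List.foldl_append, ih]

-- loop invariant: A's buffer holds exactly the pending alphabetic run `pend`
theorem pv_key (cs : List Char) : ∀ (pend : List Char) (out : List (List String)),
    (∀ c ∈ pend, PySem.Chars.isalpha c) →
    (let res := cs.foldl pvStepA (pend.map (fun ch => String.ofList [ch]), out)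
     if ¬ res.1 = [] then res.2 ++ [res.1] else res.2)
      = out ++ pvScanB (pend ++ cs) := by
  induction cs with
  | nil =>
    intro pend out h
    cases pend with
    | nil => simp [pvScanB]
    | cons p ps =>
      have hp : PySem.Chars.isalpha p := h p (by simp)
      have hps : ps.takeWhile PySem.Chars.isalpha = ps :=
        List.takeWhile_eq_self_iff.2 (fun c hc => h c (by simp [hc]))
      have hps' : ps.dropWhile PySem.Chars.isalpha = [] :=
        List.dropWhile_eq_nil_iff.2 (fun c hc => h c (by simp [hc]))
      simp [pvScanB, hp, hps, hps']
  | cons c cs ih =>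
    intro pend out h
    by_cases hc : PySem.Chars.isalpha c
    · have : pvStepA (pend.map (fun ch => String.ofList [ch]), out) c
          = ((pend ++ [c]).map (fun ch => String.ofList [ch]), out) := by
        simp [pvStepA, hc]
      rw [List.foldl_cons, this,
          ih (pend ++ [c]) out (by intro x hx; rcases List.mem_append.1 hx with h1 | h1
                                   · exact h x h1
                                   · simp at h1; subst h1; exact hc),
          List.append_assoc]
      simp
    · cases pend with
      | nil =>
        have : pvStepA (([] : List Char).map (fun ch => String.ofList [ch]), out) c
            = ([], out ++ [[String.ofList [c]]]) := by simp [pvStepA, hc]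
        rw [List.foldl_cons, this]
        have := ih [] (out ++ [[String.ofList [c]]]) (by simp)
        simp only [List.map_nil, List.nil_append] at this ⊢
        rw [this]
        simp [pvScanB, hc]
      | cons p ps =>
        have hp : PySem.Chars.isalpha p := h p (by simp)
        have hall : ∀ x ∈ ps, PySem.Chars.isalpha x = true := fun x hx => h x (by simp [hx])
        have hstep : pvStepA ((p :: ps).map (fun ch => String.ofList [ch]), out) c
            = ([], (out ++ [(p :: ps).map (fun ch => String.ofList [ch])]) ++ [[String.ofList [c]]]) := by
          simp [pvStepA, hc]
        rw [List.foldl_cons, hstep]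
        have hIH := ih [] ((out ++ [(p :: ps).map (fun ch => String.ofList [ch])]) ++ [[String.ofList [c]]]) (by simp)
        simp only [List.map_nil, List.nil_append] at hIH ⊢
        rw [hIH]
        have htw : (ps ++ c :: cs).takeWhile PySem.Chars.isalpha = ps ++ (c :: cs).takeWhile PySem.Chars.isalpha := by
          simp [List.takeWhile_append, List.takeWhile_eq_self_iff.2 (by simpa using hall)]
        have hdw : (ps ++ c :: cs).dropWhile PySem.Chars.isalpha = (c :: cs).dropWhile PySem.Chars.isalpha := by
          simp [List.dropWhile_append, List.dropWhile_eq_nil_iff.2 (by simpa using hall)]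
        simp [pvScanB, hp, hc, htw, hdw]

-- ===== VERDICT (by name: the statement is the Claim_ definition above) =====
theorem list_take_apart_spec : Claim_equal_list_take_apart := by
  intro xs _
  unfold Spec_list_take_apart list_take_apart list_take_apart_alt
  rw [pv_foldl_flat]
  have := pv_key (xs.flatMap String.toList) [] [] (by simp)
  simpa using this
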